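-- pv_equiv track=rewrite | github.com/gustavscholin/advent_of_code_2020 | task_20/task_20_2.py | find_sea_monster
-- ===== SOURCE A (Python) =====
-- def find_sea_monster(row1, row2, row3):
--     row1 = list(row1)
--     row2 = list(row2)
--     row3 = list(row3)
--     row1_indices = [18]
--     row2_indices = [0, 5, 6, 11, 12, 17, 18, 19]
--     row3_indices = [1, 4, 7, 10, 13, 16]
--     for i in range(len(row1) - 19):
--         row_matches = [
--             all([row1[i + j] in '#O' for j in row1_indices]),
--             all([row2[i + j] in '#O' for j in row2_indices]),
--             all([row3[i + j] in '#O' for j in row3_indices])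
--         ]
--         if all(row_matches):
--             for idx in row1_indices:
--                 row1[i + idx] = 'O'
--             for idx in row2_indices:
--                 row2[i + idx] = 'O'
--             for idx in row3_indices:
--                 row3[i + idx] = 'O'
--     return ''.join(row1), ''.join(row2), ''.join(row3)
-- ===== SOURCE B (Python) =====
-- def find_sea_monster(row1, row2, row3):
--     shapes = [([18], row1),
--               ([0, 5, 6, 11, 12, 17, 18, 19], row2),
--               ([1, 4, 7, 10, 13, 16], row3)]
--     # Pass 1: collect every window start that matches on the ORIGINAL rows.
--     # Marking only turns '#' into 'O' and both are accepted by the test,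
--     # so detections are unaffected by markings.
--     matches = [i for i in range(len(row1) - 19)
--                if all(row[i + j] in '#O' for js, row in shapes for j in js)]
--     # Pass 2: rebuild each row position-by-position, painting 'O' on every
--     # cell covered by some matched window.
--     def mark(pair):
--         js, row = pair
--         return ''.join('O' if any(k - i in js for i in matches) else c
--                        for k, c in enumerate(row))
--     return mark(shapes[0]), mark(shapes[1]), mark(shapes[2])
-- ===== Notes on version B (the rewrite author's own statement) =====
-- stated objective: alternative
-- what changed: B replaces A's single interleaved detect-and-mutate loop by a detection pass over the original unmutated rows collecting all matched window starts, then rebuilds each row functionally position-by-position (character k becomes 'O' iff some matched window covers it) instead of performing in-place index writes.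
import Mathlib
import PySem

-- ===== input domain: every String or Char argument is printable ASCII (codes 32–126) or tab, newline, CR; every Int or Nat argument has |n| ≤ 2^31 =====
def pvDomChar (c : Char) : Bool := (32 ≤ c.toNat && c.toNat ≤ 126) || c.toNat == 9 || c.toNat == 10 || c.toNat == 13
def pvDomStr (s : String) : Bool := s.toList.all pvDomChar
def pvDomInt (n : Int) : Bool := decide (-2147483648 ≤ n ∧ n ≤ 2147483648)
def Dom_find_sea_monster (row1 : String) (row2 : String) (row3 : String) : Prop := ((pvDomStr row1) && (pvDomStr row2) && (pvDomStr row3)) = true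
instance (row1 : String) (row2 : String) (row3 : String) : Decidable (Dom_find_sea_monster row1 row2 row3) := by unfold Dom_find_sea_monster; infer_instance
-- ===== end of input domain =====

-- B replaces A's interleaved detect-and-mutate loop by a detection pass over the
-- original rows plus a functional per-position rebuild of each row; equal return
-- values (neither mutates its String arguments). Objective: alternative, same cost.


-- shared literal data (both Pythons contain the same three index lists) and the
-- shared single-character test `row[k] in '#O'` (out-of-range read = IndexError)
def pvIn (l : List Char) (k : Int) : Bool :=
  match PySem.List.pyGet? l k with
  | some c => c == '#' || c == 'O'
  | none => false

def pvJs1 : List Int := [18]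
def pvJs2 : List Int := [0, 5, 6, 11, 12, 17, 18, 19]
def pvJs3 : List Int := [1, 4, 7, 10, 13, 16]

-- ===== PORT A =====
-- `all([row[i+j] in '#O' for j in js])`
def pvTestRow (l : List Char) (i : Int) (js : List Int) : Bool :=
  (js.map (fun j => pvIn l (i + j))).all id

-- `for idx in js: row[i+idx] = 'O'`
def pvMarkRow (l : List Char) (i : Int) (js : List Int) : List Char :=
  js.foldl (fun acc j => PySem.List.pySetD acc (i + j) 'O') l

-- one step of A's loop body: build row_matches, test all, conditionally mark in place
def pvStepA (s : List Char × List Char × List Char) (i : Int) :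
    List Char × List Char × List Char :=
  let row_matches := [pvTestRow s.1 i pvJs1, pvTestRow s.2.1 i pvJs2, pvTestRow s.2.2 i pvJs3]
  if row_matches.all id then
    (pvMarkRow s.1 i pvJs1, pvMarkRow s.2.1 i pvJs2, pvMarkRow s.2.2 i pvJs3)
  else s

def find_sea_monster (row1 : String) (row2 : String) (row3 : String) :
    String × String × String :=
  let r1 := row1.toList
  let r2 := row2.toList
  let r3 := row3.toList
  let res := (PySem.List.pyRange 0 ((r1.length : Int) - 19) 1).foldl pvStepA (r1, r2, r3)
  (String.ofList res.1, String.ofList res.2.1, String.ofList res.2.2)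

-- ===== PORT B =====
-- `shapes = [(js1, row1), (js2, row2), (js3, row3)]`
def altShapes (r1 r2 r3 : List Char) : List (List Int × List Char) :=
  [(pvJs1, r1), (pvJs2, r2), (pvJs3, r3)]

-- `all(row[i + j] in '#O' for js, row in shapes for j in js)`
def altHit (shapes : List (List Int × List Char)) (i : Int) : Bool :=
  shapes.all (fun p => p.1.all (fun j => pvIn p.2 (i + j)))

-- `''.join('O' if any(k - i in js for i in matches) else c for k, c in enumerate(row))`
def altMark (ms : List Int) (p : List Int × List Char) : List Char :=
  (PySem.List.enumerate p.2).map (fun kc =>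
    if ms.any (fun i => p.1.contains (kc.1 - i)) then 'O' else kc.2)

def find_sea_monster_alt (row1 : String) (row2 : String) (row3 : String) :
    String × String × String :=
  let shapes := altShapes row1.toList row2.toList row3.toList
  let ms := (PySem.List.pyRange 0 ((row1.toList.length : Int) - 19) 1).filter (altHit shapes)
  (String.ofList (altMark ms (pvJs1, row1.toList)),
   String.ofList (altMark ms (pvJs2, row2.toList)),
   String.ofList (altMark ms (pvJs3, row3.toList)))

-- ===== PRECONDITION & SPEC =====
-- Pre_ excludes exactly the inputs on which Python A raises IndexError: a window is
-- scanned (len row1 ≥ 20) but row2 or row3 is too short for the scanned offsets.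
def Pre_find_sea_monster (row1 : String) (row2 : String) (row3 : String) : Prop :=
  row1.toList.length < 20 ∨
    (row1.toList.length ≤ row2.toList.length ∧ row1.toList.length - 3 ≤ row3.toList.length)
instance (row1 : String) (row2 : String) (row3 : String) :
    Decidable (Pre_find_sea_monster row1 row2 row3) := by
  unfold Pre_find_sea_monster; infer_instance

def pvWitness_find_sea_monster : String × String × String :=
  ("..................#.", "#....##....##....###", ".#..#..#..#..#..#...")

def Spec_find_sea_monster (row1 : String) (row2 : String) (row3 : String)
    (out : String × String × String) : Prop := out = find_sea_monster_alt row1 row2 row3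
instance (row1 : String) (row2 : String) (row3 : String) (out : String × String × String) :
    Decidable (Spec_find_sea_monster row1 row2 row3 out) := by
  unfold Spec_find_sea_monster; infer_instance

-- ===== CLAIM =====
def Claim_equal_find_sea_monster : Prop := ∀ (row1 : String) (row2 : String) (row3 : String), Dom_find_sea_monster row1 row2 row3 → Pre_find_sea_monster row1 row2 row3 → Spec_find_sea_monster row1 row2 row3 (find_sea_monster row1 row2 row3)

-- ===== LEMMAS AND PROOFS =====

-- A single in-bounds 'O'-write at a position already in '#O' preserves the '#O'-status
-- of every nonnegative position.
lemma pvIn_set (l : List Char) (m : Int) (hm : 0 ≤ m) (h : pvIn l m = true)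
    (k : Int) (hk : 0 ≤ k) :
    pvIn (PySem.List.pySetD l m 'O') k = pvIn l k := by
  rw [PySem.List.pySetD_of_nonneg l 'O' hm]
  unfold pvIn at *
  rw [PySem.List.pyGet?_of_nonneg l hm] at h
  rw [PySem.List.pyGet?_of_nonneg _ hk, PySem.List.pyGet?_of_nonneg _ hk]
  rcases hmem : l[m.toNat]? with _ | c
  · simp [hmem] at h
  · rw [List.getElem?_set]
    by_cases hEq : m.toNat = k.toNat
    · have hlt : m.toNat < l.length := (List.getElem?_eq_some_iff.mp hmem).1
      simp only [← hEq]
      simp [hlt] at h ⊢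
      exact h
    · simp [hEq]

-- the pointwise-'#O' congruence for the membership test
lemma pvTestRow_congr (s r : List Char)
    (hInv : ∀ k : Int, 0 ≤ k → pvIn s k = pvIn r k)
    (i : Int) (hi : 0 ≤ i) (js : List Int) (hjs : ∀ j ∈ js, 0 ≤ j) :
    pvTestRow s i js = pvTestRow r i js := by
  unfold pvTestRow
  induction js with
  | nil => rfl
  | cons j t ih =>
    have hj : 0 ≤ j := hjs j (by simp)
    simp only [List.map_cons, List.all_cons]
    rw [hInv (i + j) (by omega), ih (fun x hx => hjs x (by simp [hx]))]

-- marking a matched window preserves the '#O'-status of every nonnegative position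
lemma pvMarkRow_pvIn (js : List Int) (l : List Char) (i : Int) (hi : 0 ≤ i)
    (hjs : ∀ j ∈ js, 0 ≤ j) (ht : pvTestRow l i js = true)
    (k : Int) (hk : 0 ≤ k) :
    pvIn (pvMarkRow l i js) k = pvIn l k := by
  induction js generalizing l with
  | nil => rfl
  | cons j t ih =>
    have hj : 0 ≤ j := hjs j (by simp)
    unfold pvTestRow at ht
    simp only [List.map_cons, List.all_cons, Bool.and_eq_true, id] at ht
    obtain ⟨hhead, htail⟩ := ht
    have hset := pvIn_set l (i + j) (by omega) hhead
    unfold pvMarkRow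
    simp only [List.foldl_cons]
    have htail' : pvTestRow (PySem.List.pySetD l (i + j) 'O') i t = true := by
      rw [pvTestRow_congr _ l (fun k hk => hset k hk) i hi t
        (fun x hx => hjs x (by simp [hx]))]
      unfold pvTestRow; simpa using htail
    have hrec := ih (PySem.List.pySetD l (i + j) 'O') (fun x hx => hjs x (by simp [hx])) htail'
    unfold pvMarkRow at hrec
    rw [hrec, hset k hk]

lemma pvJs1_nonneg : ∀ j ∈ pvJs1, (0:Int) ≤ j := by decide
lemma pvJs2_nonneg : ∀ j ∈ pvJs2, (0:Int) ≤ j := by decide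
lemma pvJs3_nonneg : ∀ j ∈ pvJs3, (0:Int) ≤ j := by decide

-- B's marking step, expressed as one in-place pvMarkAll over the triple
def pvMarkAll (s : List Char × List Char × List Char) (i : Int) :
    List Char × List Char × List Char :=
  (pvMarkRow s.1 i pvJs1, pvMarkRow s.2.1 i pvJs2, pvMarkRow s.2.2 i pvJs3)

-- main loop correspondence: A's conditional fold over a list of nonnegative indices
-- equals an unconditional fold over the indices that match on the ORIGINAL rows
lemma pv_loop_eq (r1 r2 r3 : List Char) (is : List Int)
    (hnn : ∀ i ∈ is, 0 ≤ i) (s1 s2 s3 : List Char)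
    (h1 : ∀ k : Int, 0 ≤ k → pvIn s1 k = pvIn r1 k)
    (h2 : ∀ k : Int, 0 ≤ k → pvIn s2 k = pvIn r2 k)
    (h3 : ∀ k : Int, 0 ≤ k → pvIn s3 k = pvIn r3 k) :
    is.foldl pvStepA (s1, s2, s3) =
      (is.filter (fun i => pvTestRow r1 i pvJs1 && pvTestRow r2 i pvJs2 && pvTestRow r3 i pvJs3)).foldl
        pvMarkAll (s1, s2, s3) := by
  induction is generalizing s1 s2 s3 with
  | nil => rfl
  | cons i t ih =>
    have hi : 0 ≤ i := hnn i (by simp)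
    have ht : ∀ x ∈ t, (0:Int) ≤ x := fun x hx => hnn x (by simp [hx])
    have e1 := pvTestRow_congr s1 r1 h1 i hi pvJs1 pvJs1_nonneg
    have e2 := pvTestRow_congr s2 r2 h2 i hi pvJs2 pvJs2_nonneg
    have e3 := pvTestRow_congr s3 r3 h3 i hi pvJs3 pvJs3_nonneg
    simp only [List.foldl_cons, List.filter_cons]
    by_cases hc : (pvTestRow r1 i pvJs1 && pvTestRow r2 i pvJs2 && pvTestRow r3 i pvJs3) = true
    · simp only [Bool.and_eq_true] at hc
      obtain ⟨⟨c1, c2⟩, c3⟩ := hc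
      have hstep : pvStepA (s1, s2, s3) i =
          (pvMarkRow s1 i pvJs1, pvMarkRow s2 i pvJs2, pvMarkRow s3 i pvJs3) := by
        unfold pvStepA
        simp [e1, e2, e3, c1, c2, c3]
      rw [hstep]
      have t1 : pvTestRow s1 i pvJs1 = true := by rw [e1]; exact c1
      have t2 : pvTestRow s2 i pvJs2 = true := by rw [e2]; exact c2
      have t3 : pvTestRow s3 i pvJs3 = true := by rw [e3]; exact c3
      have hif : (pvTestRow r1 i pvJs1 && pvTestRow r2 i pvJs2 && pvTestRow r3 i pvJs3) = true := by
        simp [c1, c2, c3]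
      simp only [hif, if_true, List.foldl_cons]
      have := ih ht (pvMarkRow s1 i pvJs1) (pvMarkRow s2 i pvJs2) (pvMarkRow s3 i pvJs3)
        (fun k hk => by rw [pvMarkRow_pvIn pvJs1 s1 i hi pvJs1_nonneg t1 k hk, h1 k hk])
        (fun k hk => by rw [pvMarkRow_pvIn pvJs2 s2 i hi pvJs2_nonneg t2 k hk, h2 k hk])
        (fun k hk => by rw [pvMarkRow_pvIn pvJs3 s3 i hi pvJs3_nonneg t3 k hk, h3 k hk])
      rw [this]
      rfl
    · have hstep : pvStepA (s1, s2, s3) i = (s1, s2, s3) := by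
        unfold pvStepA
        simp only [List.all_cons, List.all_nil, id, Bool.and_true]
        simp only [e1, e2, e3]
        rw [if_neg]
        intro h; apply hc
        simp only [Bool.and_eq_true] at h ⊢
        exact ⟨⟨h.1, h.2.1⟩, h.2.2⟩
      rw [hstep, if_neg hc]
      exact ih ht s1 s2 s3 h1 h2 h3

-- B's detection predicate coincides with A's three-row test
lemma altHit_eq (r1 r2 r3 : List Char) (i : Int) :
    altHit (altShapes r1 r2 r3) i =
      (pvTestRow r1 i pvJs1 && pvTestRow r2 i pvJs2 && pvTestRow r3 i pvJs3) := by
  simp [altHit, altShapes, pvTestRow, List.all_map, Bool.and_assoc]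

-- the fold of pvMarkAll over the triple splits into three per-row folds
lemma foldl_markAll_split (ms : List Int) (a b c : List Char) :
    ms.foldl pvMarkAll (a, b, c) =
      (ms.foldl (fun l i => pvMarkRow l i pvJs1) a,
       ms.foldl (fun l i => pvMarkRow l i pvJs2) b,
       ms.foldl (fun l i => pvMarkRow l i pvJs3) c) := by
  induction ms generalizing a b c with
  | nil => rfl
  | cons i t ih => simp only [List.foldl_cons]; exact ih _ _ _

-- getElem? characterisation of one window's writes
lemma markRow_get (js : List Int) (hjs : ∀ j ∈ js, 0 ≤ j) (l : List Char) (i : Int)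
    (hi : 0 ≤ i) (k : Nat) :
    (pvMarkRow l i js)[k]? =
      if js.contains ((k : Int) - i) ∧ k < l.length then some 'O' else l[k]? := by
  induction js generalizing l with
  | nil => simp [pvMarkRow]
  | cons j t ih =>
    have hj : 0 ≤ j := hjs j (by simp)
    unfold pvMarkRow
    simp only [List.foldl_cons]
    have := ih (fun x hx => hjs x (by simp [hx])) (PySem.List.pySetD l (i + j) 'O')
    unfold pvMarkRow at this
    rw [this]
    rw [PySem.List.pySetD_of_nonneg l 'O' (by omega)]
    simp only [List.length_set, List.getElem?_set, List.contains_cons]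
    by_cases hc : (k : Int) - i ∈ t
    · by_cases hk : k < l.length <;> simp [hc, hk] <;> omega
    · have hcontains : t.contains ((k : Int) - i) = false := by
        simpa using hc
      simp only [hcontains, Bool.or_false]
      by_cases heq : (k : Int) - i = j
      · have htn : (i + j).toNat = k := by omega
        by_cases hk : k < l.length <;> simp [heq, htn, hk]
      · have htn : (i + j).toNat ≠ k := by omega
        simp [heq, htn]

lemma length_markRow (js : List Int) (l : List Char) (i : Int) :
    (pvMarkRow l i js).length = l.length := by
  induction js generalizing l with
  | nil => rfl
  | cons j t ih =>
    unfold pvMarkRow at *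
    simp only [List.foldl_cons]
    rw [ih]
    exact PySem.List.length_pySetD l _ _

-- getElem? characterisation of a whole sequence of window marks
lemma markRows_get (ms : List Int) (hms : ∀ i ∈ ms, 0 ≤ i)
    (js : List Int) (hjs : ∀ j ∈ js, 0 ≤ j) (l : List Char) (k : Nat) :
    (ms.foldl (fun l i => pvMarkRow l i js) l)[k]? =
      if ms.any (fun i => js.contains ((k : Int) - i)) ∧ k < l.length
      then some 'O' else l[k]? := by
  induction ms generalizing l with
  | nil => simp
  | cons i t ih =>
    have hi : 0 ≤ i := hms i (by simp)
    simp only [List.foldl_cons, List.any_cons]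
    rw [ih (fun x hx => hms x (by simp [hx])), length_markRow,
      markRow_get js hjs l i hi k]
    by_cases hk : k < l.length
    · simp only [hk, and_true]
      simp only [List.any_cons, Bool.or_eq_true, List.any_eq_true]
      by_cases hE : ∃ x ∈ t, (k : Int) - x ∈ js
      · simp [hE]
      · simp [hE]
    · simp [hk]

-- B's functional rebuild has the same getElem? characterisation
lemma altMark_get (ms js : List Int) (l : List Char) (k : Nat) :
    (altMark ms (js, l))[k]? =
      if ms.any (fun i => js.contains ((k : Int) - i)) ∧ k < l.length
      then some 'O' else l[k]? := by
  unfold altMark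
  simp only [List.getElem?_map, PySem.List.getElem?_enumerate]
  by_cases hk : k < l.length
  · have hg : l[k]? = some l[k] := List.getElem?_eq_getElem hk
    simp only [hg, Option.map_some, hk, and_true, zero_add]
    split_ifs <;> first | rfl | tauto
  · have hg : l[k]? = none := List.getElem?_eq_none (by omega)
    simp [hg, hk]

-- per-row bridge: the imperative marking fold equals B's rebuild
lemma markRows_eq_altMark (ms : List Int) (hms : ∀ i ∈ ms, 0 ≤ i)
    (js : List Int) (hjs : ∀ j ∈ js, 0 ≤ j) (l : List Char) :
    ms.foldl (fun l i => pvMarkRow l i js) l = altMark ms (js, l) := by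
  apply List.ext_getElem?
  intro k
  rw [markRows_get ms hms js hjs l k, altMark_get ms js l k]

-- ===== VERDICT =====
theorem find_sea_monster_spec : Claim_equal_find_sea_monster := by
  intro row1 row2 row3 _ _
  unfold Spec_find_sea_monster
  simp only [find_sea_monster, find_sea_monster_alt]
  have hnn : ∀ i ∈ PySem.List.pyRange 0 ((row1.toList.length : Int) - 19) 1, (0:Int) ≤ i := by
    intro i hi
    exact (PySem.List.mem_pyRange_one.mp hi).1
  rw [pv_loop_eq row1.toList row2.toList row3.toList _ hnn row1.toList row2.toList row3.toList
    (fun _ _ => rfl) (fun _ _ => rfl) (fun _ _ => rfl)]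
  have hfilter :
      (PySem.List.pyRange 0 ((row1.toList.length : Int) - 19) 1).filter
        (fun i => pvTestRow row1.toList i pvJs1 && pvTestRow row2.toList i pvJs2 &&
          pvTestRow row3.toList i pvJs3) =
      (PySem.List.pyRange 0 ((row1.toList.length : Int) - 19) 1).filter
        (altHit (altShapes row1.toList row2.toList row3.toList)) := by
    apply List.filter_congr
    intro i _
    rw [altHit_eq]
  rw [hfilter]
  set ms := (PySem.List.pyRange 0 ((row1.toList.length : Int) - 19) 1).filter
    (altHit (altShapes row1.toList row2.toList row3.toList)) with hms_def
  have hmsnn : ∀ i ∈ ms, (0:Int) ≤ i := by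
    intro i hi
    exact hnn i (List.mem_of_mem_filter hi)
  rw [foldl_markAll_split,
    markRows_eq_altMark ms hmsnn pvJs1 pvJs1_nonneg,
    markRows_eq_altMark ms hmsnn pvJs2 pvJs2_nonneg,
    markRows_eq_altMark ms hmsnn pvJs3 pvJs3_nonneg]
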